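-- pv_equiv track=rewrite | github.com/bittr-ai/tess-vetter | src/tess_vetter/code_mode/migration/ops_library_migration.py | _infer_renames
-- ===== SOURCE A (Python) =====
-- from collections import defaultdict
-- from collections.abc import Iterable, Mapping, Sequence
--
-- def _leaf_token(operation_id: str) -> str:
--     """Return the suffix token used for conservative rename inference."""
--     return operation_id.rsplit(".", 1)[-1]
--
-- def _infer_renames(
--     missing_ids: Sequence[str],
--     added_ids: Sequence[str],
-- ) -> tuple[tuple[str, str], ...]:
--     """Infer probable renames when missing/added ids share a unique leaf token."""
--     missing_by_leaf: dict[str, list[str]] = defaultdict(list)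
--     added_by_leaf: dict[str, list[str]] = defaultdict(list)
--     for legacy_id in missing_ids:
--         missing_by_leaf[_leaf_token(legacy_id)].append(legacy_id)
--     for modular_id in added_ids:
--         added_by_leaf[_leaf_token(modular_id)].append(modular_id)
--
--     inferred: list[tuple[str, str]] = []
--     for leaf in sorted(set(missing_by_leaf) & set(added_by_leaf)):
--         missing_for_leaf = sorted(missing_by_leaf[leaf])
--         added_for_leaf = sorted(added_by_leaf[leaf])
--         if len(missing_for_leaf) == 1 and len(added_for_leaf) == 1:
--             inferred.append((missing_for_leaf[0], added_for_leaf[0]))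
--     return tuple(sorted(inferred))
-- ===== SOURCE B (Python) =====
-- def _leaf_token(operation_id: str) -> str:
--     # suffix after the last '.', the whole id if none (via rpartition)
--     return operation_id.rpartition(".")[2]
--
--
-- def _infer_renames(missing_ids, added_ids):
--     pairs = []
--     for leaf in {_leaf_token(m) for m in missing_ids}:
--         ms = [m for m in missing_ids if _leaf_token(m) == leaf]
--         adds = [a for a in added_ids if _leaf_token(a) == leaf]
--         if len(ms) == 1 and len(adds) == 1:
--             pairs.append((ms[0], adds[0]))
--     return tuple(sorted(pairs))
-- ===== Notes on version B (the rewrite author's own statement) =====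
-- stated objective: simpler
-- what changed: Drops all dict bucketing: for each distinct missing-side leaf it rescans both input lists with a filter and pairs the two ids when both filters are singletons; only the final pair list is sorted.
import Mathlib
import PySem

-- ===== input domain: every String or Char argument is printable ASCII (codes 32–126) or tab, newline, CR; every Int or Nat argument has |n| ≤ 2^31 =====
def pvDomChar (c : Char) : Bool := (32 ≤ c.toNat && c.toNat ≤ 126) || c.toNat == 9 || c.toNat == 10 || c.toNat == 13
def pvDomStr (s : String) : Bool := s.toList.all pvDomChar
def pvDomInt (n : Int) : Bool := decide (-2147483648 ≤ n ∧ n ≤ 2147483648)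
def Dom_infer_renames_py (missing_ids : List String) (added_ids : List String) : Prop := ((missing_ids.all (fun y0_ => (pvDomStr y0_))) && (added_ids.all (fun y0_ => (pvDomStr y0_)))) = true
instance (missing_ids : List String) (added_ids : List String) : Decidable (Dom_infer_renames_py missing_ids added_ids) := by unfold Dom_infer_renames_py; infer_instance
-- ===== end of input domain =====

-- B drops A's dict bucketing entirely: for each distinct missing-side leaf it rescans both
-- input lists with a filter and pairs the two ids when both filters are singletons (simpler).

-- ===== PORT A =====
-- hand port of _leaf_token, i.e. s.rsplit(".", 1)[-1]: the suffix after the LAST '.',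
-- or the whole string when there is no '.' — exact (the accumulator is reset at each '.').
def leafTok (s : String) : String :=
  String.ofList (s.toList.foldl (fun acc c => if c = '.' then [] else acc ++ [c]) [])

-- the defaultdict(list)-append loop shared by A's two grouping passes
def bucketize (ids : List String) : PySem.Dict String (List String) :=
  ids.foldl (fun d i => d.modify (leafTok i) [] (fun xs => xs ++ [i])) PySem.Dict.empty

def infer_renames_py (missing_ids : List String) (added_ids : List String) : List (String × String) :=
  let missing_by_leaf := bucketize missing_ids
  let added_by_leaf := bucketize added_ids
  -- sorted(set(missing_by_leaf) & set(added_by_leaf))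
  let common := PySem.List.sorted
    (PySem.Set.inter (PySem.Set.ofList missing_by_leaf.keys) (PySem.Set.ofList added_by_leaf.keys))
    (fun x => x) false
  let inferred := common.foldl (fun acc leaf =>
    let missing_for_leaf := PySem.List.sorted (missing_by_leaf.getD leaf []) (fun x => x) false
    let added_for_leaf := PySem.List.sorted (added_by_leaf.getD leaf []) (fun x => x) false
    if missing_for_leaf.length == 1 && added_for_leaf.length == 1 then
      -- [0]-indexing of the two length-1 lists; the none branch is unreachable under the guard
      match missing_for_leaf.head?, added_for_leaf.head? with
      | some m, some a => acc ++ [(m, a)]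
      | _, _ => acc
    else acc) []
  PySem.List.sorted2 inferred Prod.fst Prod.snd false

-- ===== PORT B =====
-- B's _leaf_token via rpartition: the suffix after the LAST '.' — ported as take-while-not-'.'
-- over the reversed character list (exact: same suffix).
def leafTokB (s : String) : String :=
  String.ofList ((s.toList.reverse.takeWhile (fun c => !(c == '.'))).reverse)

def infer_renames_py_alt (missing_ids : List String) (added_ids : List String) : List (String × String) :=
  -- for leaf in {_leaf_token(m) for m in missing_ids}: a set consumed where order cannot matter
  -- (the pair list is sorted at the end)
  let pairs := (PySem.Set.ofList (missing_ids.map leafTokB)).foldl (fun acc leaf =>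
    let ms := missing_ids.filter (fun m => leafTokB m == leaf)
    let adds := added_ids.filter (fun a => leafTokB a == leaf)
    if ms.length == 1 && adds.length == 1 then
      -- ms[0] / adds[0] of the two length-1 lists; the none branch is unreachable under the guard
      acc ++ (ms.head?.bind (fun m => adds.head?.map (fun a => (m, a)))).toList
    else acc) []
  PySem.List.sorted2 pairs Prod.fst Prod.snd false

-- ===== PRECONDITION & SPEC =====
def Spec_infer_renames_py (missing_ids : List String) (added_ids : List String) (out : List (String × String)) : Prop := out = infer_renames_py_alt missing_ids added_ids
instance (missing_ids : List String) (added_ids : List String) (out : List (String × String)) : Decidable (Spec_infer_renames_py missing_ids added_ids out) := by unfold Spec_infer_renames_py; infer_instance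

-- ===== CLAIM (what is proved, stated in full; the proofs are below) =====
def Claim_equal_infer_renames_py : Prop := ∀ (missing_ids : List String) (added_ids : List String), Dom_infer_renames_py missing_ids added_ids → Spec_infer_renames_py missing_ids added_ids (infer_renames_py missing_ids added_ids)

-- ===== LEMMAS AND PROOFS =====

-- B's leaf-token helper computes the same suffix as A's
theorem leafTokB_eq (s : String) : leafTokB s = leafTok s := by
  unfold leafTokB leafTok
  congr 1
  induction s.toList using List.reverseRecOn with
  | nil => rfl
  | append_singleton l c ih =>
    rw [List.foldl_append, List.reverse_append]
    simp only [List.reverse_singleton, List.singleton_append, List.takeWhile_cons, List.foldl_cons, List.foldl_nil]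
    by_cases h : c = '.'
    · simp [h]
    · simp only [h, if_false, if_true, show (!(c == '.')) = true by simp [h]]
      rw [List.reverse_cons, ih]

theorem leafTokB_funeq : leafTokB = leafTok := funext leafTokB_eq

-- the canonical per-leaf pairing both programs compute
def pairOf (missing_ids added_ids : List String) (l : String) : Option (String × String) :=
  match missing_ids.filter (fun i => leafTok i == l), added_ids.filter (fun i => leafTok i == l) with
  | [m], [a] => some (m, a)
  | _, _ => none

-- ---- A side ----
theorem bucket_getD (ids : List String) (l : String) :
    (bucketize ids).getD l [] = ids.filter (fun i => leafTok i == l) := by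
  have h := PySem.Dict.getD_foldl_modify_append (ids.map (fun i => (leafTok i, i)))
    (PySem.Dict.empty : PySem.Dict String (List String)) l
  rw [List.foldl_map] at h
  simp only [Function.comp_def, List.filter_map] at h
  simpa [bucketize, List.map_map, Function.comp_def] using h

theorem bucket_keys (ids : List String) :
    (bucketize ids).keys = PySem.Set.ofList (ids.map leafTok) := by
  unfold bucketize
  rw [PySem.Dict.keys_foldl_modify_key ids leafTok [] (fun _ i => fun xs => xs ++ [i])]
  simp [PySem.Dict.keys_empty, PySem.Set.update_nil_left]

theorem foldl_append_body {α β : Type} (f : List β → α → List β) (F : α → Option β)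
    (h : ∀ acc x, f acc x = acc ++ (F x).toList) (l : List α) (acc : List β) :
    l.foldl f acc = acc ++ l.filterMap F := by
  induction l generalizing acc with
  | nil => simp
  | cons x t ih => cases hF : F x <;> simp [h, ih, hF]

theorem filterMap_filter_of_none {α β : Type} (F : α → Option β) (p : α → Bool)
    (h : ∀ x, p x = false → F x = none) (xs : List α) :
    (xs.filter p).filterMap F = xs.filterMap F := by
  induction xs with
  | nil => rfl
  | cons x t ih =>
    cases hp : p x
    · rw [List.filter_cons_of_neg (by simp [hp]), List.filterMap_cons, h x hp, ih]
    · rw [List.filter_cons_of_pos (by simp [hp]), List.filterMap_cons, List.filterMap_cons, ih]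

theorem sorted_nil' : PySem.List.sorted ([] : List String) (fun x => x) false = [] := rfl

theorem sorted_single (x : String) : PySem.List.sorted [x] (fun y => y) false = [x] := rfl

theorem A_filterMap (missing_ids added_ids : List String) :
    infer_renames_py missing_ids added_ids
      = PySem.List.sorted2
          ((PySem.List.sorted
              (PySem.Set.inter (PySem.Set.ofList (missing_ids.map leafTok))
                (PySem.Set.ofList (added_ids.map leafTok))) (fun x => x) false).filterMap
            (pairOf missing_ids added_ids))
          Prod.fst Prod.snd false := by
  unfold infer_renames_py
  dsimp only
  rw [bucket_keys, bucket_keys, PySem.Set.ofList_ofList, PySem.Set.ofList_ofList]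
  congr 1
  rw [foldl_append_body _ (pairOf missing_ids added_ids) ?hb, List.nil_append]
  case hb =>
    intro acc l
    dsimp only
    simp only [bucket_getD, pairOf]
    cases hm : missing_ids.filter (fun i => leafTok i == l) with
    | nil =>
      cases ha : added_ids.filter (fun i => leafTok i == l) with
      | nil => simp [sorted_nil']
      | cons a as => cases as <;> simp [sorted_nil', PySem.List.length_sorted]
    | cons m ms =>
      cases ms with
      | cons _ _ =>
        cases ha : added_ids.filter (fun i => leafTok i == l) with
        | nil => simp [sorted_nil', PySem.List.length_sorted]
        | cons a as => cases as <;> simp [PySem.List.length_sorted]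
      | nil =>
        cases ha : added_ids.filter (fun i => leafTok i == l) with
        | nil => simp [sorted_single, sorted_nil']
        | cons a as => cases as <;> simp [sorted_single, PySem.List.length_sorted]

-- ---- B side ----
theorem B_filterMap (missing_ids added_ids : List String) :
    infer_renames_py_alt missing_ids added_ids
      = PySem.List.sorted2
          ((PySem.Set.ofList (missing_ids.map leafTok)).filterMap (pairOf missing_ids added_ids))
          Prod.fst Prod.snd false := by
  unfold infer_renames_py_alt
  rw [leafTokB_funeq]
  rw [foldl_append_body _ (pairOf missing_ids added_ids) ?hb, List.nil_append]
  case hb =>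
    intro acc l
    dsimp only
    simp only [pairOf]
    cases hm : missing_ids.filter (fun i => leafTok i == l) with
    | nil =>
      cases ha : added_ids.filter (fun i => leafTok i == l) with
      | nil => simp
      | cons a as => cases as <;> simp
    | cons m ms =>
      cases ms with
      | cons _ _ =>
        cases ha : added_ids.filter (fun i => leafTok i == l) with
        | nil => simp
        | cons a as => cases as <;> simp
      | nil =>
        cases ha : added_ids.filter (fun i => leafTok i == l) with
        | nil => simp
        | cons a as => cases as <;> simp

-- ---- the final sort: sorted(list of pairs) is insertion sort under the lexicographic key ----
theorem sorted2_eq_sorted_toLex (xs : List (String × String)) :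
    PySem.List.sorted2 xs Prod.fst Prod.snd false
      = PySem.List.sorted xs (fun p => (toLex p : Lex (String × String))) false := by
  show List.foldl _ [] xs = List.foldl _ [] xs
  congr 1
  funext acc p
  congr 1
  funext a b
  show (decide (a.1 < b.1) || (!decide (b.1 < a.1) && decide (a.2 < b.2)))
      = decide ((toLex a : Lex (String × String)) < toLex b)
  rcases lt_trichotomy a.1 b.1 with h | h | h
  · simp [Prod.Lex.lt_iff, h]
  · simp [Prod.Lex.lt_iff, h]
  · have hne : a.1 ≠ b.1 := ne_of_gt h
    have h2 : ¬ ((toLex a : Lex (String × String)) < toLex b) := by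
      rw [Prod.Lex.lt_iff]
      push Not
      exact ⟨asymm h, fun he => absurd he hne⟩
    simp [asymm h, h, h2]

-- ---- the two programs sort permutations of the same pair list ----
theorem infer_renames_py_eq (missing_ids added_ids : List String) :
    infer_renames_py missing_ids added_ids = infer_renames_py_alt missing_ids added_ids := by
  rw [A_filterMap, B_filterMap, sorted2_eq_sorted_toLex, sorted2_eq_sorted_toLex]
  apply PySem.List.sorted_eq_sorted_of_perm _ _ _ (fun a b h => toLex.injective h)
  have hX : PySem.Set.inter (PySem.Set.ofList (missing_ids.map leafTok)) (PySem.Set.ofList (added_ids.map leafTok))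
      = (PySem.Set.ofList (missing_ids.map leafTok)).filter
          (fun x => PySem.Set.contains (PySem.Set.ofList (added_ids.map leafTok)) x) := rfl
  have h1 := (PySem.List.sorted_perm (PySem.Set.inter (PySem.Set.ofList (missing_ids.map leafTok)) (PySem.Set.ofList (added_ids.map leafTok))) (fun x => x) false).filterMap (pairOf missing_ids added_ids)
  apply h1.trans
  rw [hX, filterMap_filter_of_none]
  intro x hx
  unfold pairOf
  cases ha : added_ids.filter (fun i => leafTok i == x) with
  | nil => cases missing_ids.filter (fun i => leafTok i == x) with
    | nil => rfl
    | cons m ms => cases ms <;> rfl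
  | cons a s =>
    exfalso
    have hmem : a ∈ added_ids.filter (fun i => leafTok i == x) := by rw [ha]; exact List.mem_cons_self
    rw [List.mem_filter] at hmem
    have hxa : leafTok a = x := by simpa using hmem.2
    have : x ∈ PySem.Set.ofList (added_ids.map leafTok) := by
      rw [PySem.Set.mem_ofList]
      exact List.mem_map.2 ⟨a, hmem.1, hxa⟩
    rw [(PySem.Set.contains_iff _ _).2 this] at hx
    exact absurd hx (by simp)

-- ===== VERDICT (by name: the statement is the Claim_ definition above) =====
theorem infer_renames_py_spec : Claim_equal_infer_renames_py := by
  intro missing_ids added_ids _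
  unfold Spec_infer_renames_py
  exact infer_renames_py_eq missing_ids added_ids
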